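-- pv_equiv track=rewrite | github.com/xn4224nx/Advent-of-Code-Py | 2015/Day_15/main.py | score_weight_comb
-- ===== SOURCE A (Python) =====
-- def score_weight_comb(
--     properties: dict[str : dict[str:int]], weight_comb: dict[str:int]
-- ) -> int:
--     score = 1
--
--     for attr in ["capacity", "durability", "flavor", "texture"]:
--         score *= max(
--             sum(
--                 [
--                     properties[name][attr] * weight
--                     for name, weight in weight_comb.items()
--                 ]
--             ),
--             0,
--         )
--
--     return score
-- ===== SOURCE B (Python) =====
-- def score_weight_comb(
--     properties: dict[str : dict[str:int]], weight_comb: dict[str:int]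
-- ) -> int:
--     # Recursive decomposition: each ingredient is a scaled 4-vector of its four
--     # attributes; the totals vector is built back-to-front by structural recursion
--     # on the ingredient list, then the score is the product of the clamped components.
--     def totals(items):
--         if not items:
--             return (0, 0, 0, 0)
--         (name, weight) = items[0]
--         ing = properties[name]
--         c, d, f, t = totals(items[1:])
--         return (
--             ing["capacity"] * weight + c,
--             ing["durability"] * weight + d,
--             ing["flavor"] * weight + f,
--             ing["texture"] * weight + t,
--         )
--
--     score = 1
--     for v in totals(list(weight_comb.items())):
--         score *= max(v, 0)
--     return score
-- ===== Notes on version B (the rewrite author's own statement) =====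
-- stated objective: alternative
-- what changed: A loops over the four attributes and for each builds and sums a fresh list over all of weight_comb; B treats each ingredient as one scaled 4-vector and builds the totals vector back-to-front by structural recursion on the ingredient list, then folds the product of the clamped components.
import Mathlib
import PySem

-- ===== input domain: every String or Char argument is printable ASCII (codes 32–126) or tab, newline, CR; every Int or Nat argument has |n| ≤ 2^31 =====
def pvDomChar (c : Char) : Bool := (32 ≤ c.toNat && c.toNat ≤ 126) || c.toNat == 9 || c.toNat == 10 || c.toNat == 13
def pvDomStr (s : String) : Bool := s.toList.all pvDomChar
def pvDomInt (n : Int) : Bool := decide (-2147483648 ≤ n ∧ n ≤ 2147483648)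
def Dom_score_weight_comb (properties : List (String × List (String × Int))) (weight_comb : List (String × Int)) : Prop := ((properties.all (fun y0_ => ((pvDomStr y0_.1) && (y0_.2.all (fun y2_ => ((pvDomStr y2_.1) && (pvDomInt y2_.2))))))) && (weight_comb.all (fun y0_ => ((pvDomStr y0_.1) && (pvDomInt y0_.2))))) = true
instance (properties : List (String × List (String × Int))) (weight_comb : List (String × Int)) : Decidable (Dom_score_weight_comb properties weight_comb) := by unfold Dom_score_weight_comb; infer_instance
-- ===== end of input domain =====

-- B replaces A's four per-attribute list-building scans with a structural recursion
-- that builds the 4-vector of totals back-to-front, then multiplies the clamped components.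
-- ===== PORT A =====
def score_weight_comb (properties : List (String × List (String × Int))) (weight_comb : List (String × Int)) : Int :=
  ["capacity", "durability", "flavor", "texture"].foldl
    (fun score attr =>
      score *
        max
          (((PySem.Dict.ofList weight_comb).items.map (fun nw =>
              ((PySem.Dict.ofList (((PySem.Dict.ofList properties).get? nw.1).getD [])).get? attr).getD 0 * nw.2)).sum)
          0)
    1

-- ===== PORT B =====
-- B's recursive helper 'totals': head ingredient's scaled 4-vector added onto the
-- recursively computed totals of the tail.
def pvTotals (get : String → String → Int) : List (String × Int) → Int × Int × Int × Int
  | [] => (0, 0, 0, 0)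
  | nw :: rest =>
    let r := pvTotals get rest
    (get nw.1 "capacity" * nw.2 + r.1,
     get nw.1 "durability" * nw.2 + r.2.1,
     get nw.1 "flavor" * nw.2 + r.2.2.1,
     get nw.1 "texture" * nw.2 + r.2.2.2)

def score_weight_comb_alt (properties : List (String × List (String × Int))) (weight_comb : List (String × Int)) : Int :=
  let attrGet := fun (name attr : String) =>
    ((PySem.Dict.ofList (((PySem.Dict.ofList properties).get? name).getD [])).get? attr).getD 0
  let t := pvTotals attrGet (PySem.Dict.ofList weight_comb).items
  [t.1, t.2.1, t.2.2.1, t.2.2.2].foldl (fun score v => score * max v 0) 1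

-- ===== PRECONDITION & SPEC =====
-- Pre_ excludes exactly the inputs where Python A raises KeyError: an ingredient name of
-- weight_comb absent from properties, or an ingredient dict missing one of the four attributes.
def Pre_score_weight_comb (properties : List (String × List (String × Int))) (weight_comb : List (String × Int)) : Prop :=
  ((PySem.Dict.ofList weight_comb).items.all (fun nw =>
    match (PySem.Dict.ofList properties).get? nw.1 with
    | none => false
    | some d => ["capacity", "durability", "flavor", "texture"].all (fun attr =>
        ((PySem.Dict.ofList d).get? attr).isSome))) = true
instance (properties : List (String × List (String × Int))) (weight_comb : List (String × Int)) : Decidable (Pre_score_weight_comb properties weight_comb) := by unfold Pre_score_weight_comb; infer_instance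

def pvWitness_score_weight_comb : (List (String × List (String × Int))) × (List (String × Int)) :=
  ([("A", [("capacity", 2), ("durability", -1), ("flavor", 3), ("texture", 1)])], [("A", 3)])

def Spec_score_weight_comb (properties : List (String × List (String × Int))) (weight_comb : List (String × Int)) (out : Int) : Prop := out = score_weight_comb_alt properties weight_comb
instance (properties : List (String × List (String × Int))) (weight_comb : List (String × Int)) (out : Int) : Decidable (Spec_score_weight_comb properties weight_comb out) := by unfold Spec_score_weight_comb; infer_instance

-- ===== CLAIM (what is proved, stated in full; the proofs are below) =====
def Claim_equal_score_weight_comb : Prop := ∀ (properties : List (String × List (String × Int))) (weight_comb : List (String × Int)), Dom_score_weight_comb properties weight_comb → Pre_score_weight_comb properties weight_comb → Spec_score_weight_comb properties weight_comb (score_weight_comb properties weight_comb)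

-- ===== LEMMAS AND PROOFS =====

-- B's back-to-front recursion computes, componentwise, the four sums that A computes
-- by separate scans of weight_comb.
theorem pvTotals_eq (g : String → String → Int) (l : List (String × Int)) :
    pvTotals g l
    = ((l.map (fun nw => g nw.1 "capacity" * nw.2)).sum,
       (l.map (fun nw => g nw.1 "durability" * nw.2)).sum,
       (l.map (fun nw => g nw.1 "flavor" * nw.2)).sum,
       (l.map (fun nw => g nw.1 "texture" * nw.2)).sum) := by
  induction l with
  | nil => simp [pvTotals]
  | cons x xs ih => simp [pvTotals, ih]

-- ===== VERDICT (by name: the statement is the Claim_ definition above) =====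
theorem score_weight_comb_spec : Claim_equal_score_weight_comb := by
  intro properties weight_comb _ _
  unfold Spec_score_weight_comb score_weight_comb score_weight_comb_alt
  simp only [pvTotals_eq, List.foldl_cons, List.foldl_nil, one_mul]
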